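-- pv_equiv track=rewrite | github.com/sam-k0/ClashRoyale-CardCalc | RoyaleAPI.py | get_required_upgrade_cards
-- ===== SOURCE A (Python) =====
-- COMMON_CARDS_UPGRADE_NUM = [1,2,4,10,20,50,100,200,400,800,1000,1500,3000,5000]
--
-- RARE_CARDS_UPGRADE_NUM =   [0,0,1,2,4,10,20,50,100,200,400,500,750,1250]
--
-- EPIC_CARDS_UPGRADE_NUM =   [0,0,0,0,0,1,2,4,10,20,40,50,100,200]
--
-- LEGENDARY_CARDS_UPGRADE_NUM = [0,0,0,0,0,0,0,0,1,2,4,6,10,20]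
--
-- CHAMP_CARDS_UPGRADE_NUM = [0,0,0,0,0,0,0,0,0,0,1,2,8,20]
--
-- RARITY_LEGENDARY = "legendary"
--
-- RARITY_EPIC = "epic"
--
-- RARITY_RARE = "rare"
--
-- RARITY_COMMON = "common"
--
-- RARITY_CHAMP = "champion"
--
-- def get_required_upgrade_cards(currentLevel:int, targetLevel:int, currentCount:int, rarity:str) -> int:
--     # Get the correct array of upgrade numbers
--     if currentLevel >= targetLevel:
--         return 0
--     if targetLevel > 14:
--         raise ValueError("Target level cannot be higher than 14, as it needs wildcard tokens to upgrade.")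
--
--     upgradeNum = []
--     rarityStart = 0
--     if rarity == RARITY_COMMON:
--         upgradeNum = COMMON_CARDS_UPGRADE_NUM
--     elif rarity == RARITY_RARE:
--         upgradeNum = RARE_CARDS_UPGRADE_NUM
--         rarityStart = 2
--     elif rarity == RARITY_EPIC:
--         upgradeNum = EPIC_CARDS_UPGRADE_NUM
--         rarityStart = 5
--     elif rarity == RARITY_LEGENDARY:
--         rarityStart = 8
--         upgradeNum = LEGENDARY_CARDS_UPGRADE_NUM
--     elif rarity == RARITY_CHAMP:
--         rarityStart = 10
--         upgradeNum = CHAMP_CARDS_UPGRADE_NUM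
--     else:
--         raise ValueError("Invalid rarity")
--
--     # sum up the missing cards until the target level
--     missingCards = 0
--     for i in range(currentLevel+rarityStart, targetLevel):
--         missingCards += upgradeNum[i]
--     # factor in the current card count
--     missingCards -= currentCount
--     return missingCards
-- ===== SOURCE B (Python) =====
-- # Prefix-sum tables: _PREFIX[r][i] = sum of the first i per-level upgrade costs,
-- # so a level-range sum becomes one subtraction instead of a loop.
-- def _prefix(costs):
--     acc, out = 0, [0]
--     for c in costs:
--         acc += c
--         out.append(acc)
--     return out
--
-- _TABLES = {
--     "common":    (0,  [1, 2, 4, 10, 20, 50, 100, 200, 400, 800, 1000, 1500, 3000, 5000]),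
--     "rare":      (2,  [0, 0, 1, 2, 4, 10, 20, 50, 100, 200, 400, 500, 750, 1250]),
--     "epic":      (5,  [0, 0, 0, 0, 0, 1, 2, 4, 10, 20, 40, 50, 100, 200]),
--     "legendary": (8,  [0, 0, 0, 0, 0, 0, 0, 0, 1, 2, 4, 6, 10, 20]),
--     "champion":  (10, [0, 0, 0, 0, 0, 0, 0, 0, 0, 0, 1, 2, 8, 20]),
-- }
-- _PREFIX = {r: (off, _prefix(costs)) for r, (off, costs) in _TABLES.items()}
--
-- def get_required_upgrade_cards(currentLevel: int, targetLevel: int, currentCount: int, rarity: str) -> int: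
--     if currentLevel >= targetLevel:
--         return 0
--     if targetLevel > 14:
--         raise ValueError("Target level cannot be higher than 14, as it needs wildcard tokens to upgrade.")
--     if rarity not in _PREFIX:
--         raise ValueError("Invalid rarity")
--     offset, prefix = _PREFIX[rarity]
--     lo = min(max(currentLevel + offset, 0), targetLevel)
--     return prefix[targetLevel] - prefix[lo] - currentCount
-- ===== Notes on version B (the rewrite author's own statement) =====
-- stated objective: alternative
-- what changed: Replaces the per-level summation loop with precomputed prefix-sum tables per rarity, so the range sum is one subtraction of two prefix values (clamped so an empty range gives 0).
-- outside the precondition, e.g. on get_required_upgrade_cards(-3, 2, 0, 'common'): A returns 9503, B returns 3; on get_required_upgrade_cards(-30, 2, 0, 'common'): A raises IndexError, B returns 3; on get_required_upgrade_cards(1, 15, 0, 'common'): A raises ValueError, B raises ValueError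
import Mathlib
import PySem

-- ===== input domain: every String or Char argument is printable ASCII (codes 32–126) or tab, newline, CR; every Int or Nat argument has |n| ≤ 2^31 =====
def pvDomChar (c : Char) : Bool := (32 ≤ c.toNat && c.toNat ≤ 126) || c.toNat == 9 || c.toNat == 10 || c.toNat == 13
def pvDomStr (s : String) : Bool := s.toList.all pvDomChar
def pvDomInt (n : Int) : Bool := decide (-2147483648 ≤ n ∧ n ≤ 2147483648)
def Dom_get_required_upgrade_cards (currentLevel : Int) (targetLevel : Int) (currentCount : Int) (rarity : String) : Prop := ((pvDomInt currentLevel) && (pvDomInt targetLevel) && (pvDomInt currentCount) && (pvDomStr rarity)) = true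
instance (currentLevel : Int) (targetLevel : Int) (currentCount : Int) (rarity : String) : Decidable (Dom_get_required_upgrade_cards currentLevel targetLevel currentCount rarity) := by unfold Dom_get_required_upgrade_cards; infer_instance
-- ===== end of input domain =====

-- ===== PORT A =====
-- B replaces A's per-level summation loop by prefix-sum tables (one subtraction); same ValueErrors kept.
def pvCommon : List Int := [1,2,4,10,20,50,100,200,400,800,1000,1500,3000,5000]
def pvRare : List Int := [0,0,1,2,4,10,20,50,100,200,400,500,750,1250]
def pvEpic : List Int := [0,0,0,0,0,1,2,4,10,20,40,50,100,200]
def pvLegendary : List Int := [0,0,0,0,0,0,0,0,1,2,4,6,10,20]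
def pvChamp : List Int := [0,0,0,0,0,0,0,0,0,0,1,2,8,20]

def get_required_upgrade_cards (currentLevel : Int) (targetLevel : Int) (currentCount : Int) (rarity : String) : Int :=
  if currentLevel >= targetLevel then 0
  else if targetLevel > 14 then 0  -- Python: raise ValueError (excluded by Pre_)
  else
    let p : List Int × Int :=
      if rarity == "common" then (pvCommon, 0)
      else if rarity == "rare" then (pvRare, 2)
      else if rarity == "epic" then (pvEpic, 5)
      else if rarity == "legendary" then (pvLegendary, 8)
      else if rarity == "champion" then (pvChamp, 10)
      else ([], 0)  -- Python: raise ValueError (excluded by Pre_)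
    let missingCards : Int :=
      (PySem.List.pyRange (currentLevel + p.2) targetLevel 1).foldl
        (fun acc i => acc + ((PySem.List.pyGet? p.1 i).getD 0)) 0
        -- .getD 0: Python raises IndexError when the index is out of range (excluded by Pre_)
    missingCards - currentCount

-- ===== PORT B =====
-- helper _prefix from Source B
def pvPrefix (costs : List Int) : List Int :=
  (costs.foldl (fun (st : Int × List Int) c => (st.1 + c, st.2 ++ [st.1 + c])) (0, [0])).2

def pvPrefixTable : PySem.Dict String (Int × List Int) :=
  PySem.Dict.ofList [("common", ((0:Int), pvPrefix pvCommon)),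
   ("rare", (2, pvPrefix pvRare)),
   ("epic", (5, pvPrefix pvEpic)),
   ("legendary", (8, pvPrefix pvLegendary)),
   ("champion", (10, pvPrefix pvChamp))]

def get_required_upgrade_cards_alt (currentLevel : Int) (targetLevel : Int) (currentCount : Int) (rarity : String) : Int :=
  if currentLevel >= targetLevel then 0
  else if targetLevel > 14 then 0  -- Python: raise ValueError (excluded by Pre_)
  else
    let core : Int :=
      match PySem.Dict.get? pvPrefixTable rarity with
      | none => 0  -- Python: raise ValueError (excluded by Pre_)
      | some op =>
        let lo : Int := min (max (currentLevel + op.1) 0) targetLevel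
        ((PySem.List.pyGet? op.2 targetLevel).getD 0) - ((PySem.List.pyGet? op.2 lo).getD 0)
    core - currentCount

-- ===== PRECONDITION & SPEC =====
-- Pre_ admits the early-return case (currentLevel >= targetLevel) and the natural upgrade domain
-- 0 <= currentLevel < targetLevel <= 14 with a known rarity. It excludes: targetLevel > 14 and
-- unknown rarities (A raises ValueError), and negative currentLevel on the upgrade path, which is
-- outside the game's level range: there A either raises IndexError or returns a value produced by
-- Python negative-index wraparound.
def Pre_get_required_upgrade_cards (currentLevel : Int) (targetLevel : Int) (currentCount : Int) (rarity : String) : Prop :=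
  targetLevel ≤ currentLevel ∨
    (0 ≤ currentLevel ∧ currentLevel < targetLevel ∧ targetLevel ≤ 14 ∧
      (rarity = "common" ∨ rarity = "rare" ∨ rarity = "epic" ∨ rarity = "legendary" ∨ rarity = "champion"))
instance (currentLevel : Int) (targetLevel : Int) (currentCount : Int) (rarity : String) : Decidable (Pre_get_required_upgrade_cards currentLevel targetLevel currentCount rarity) := by unfold Pre_get_required_upgrade_cards; infer_instance

def pvWitness_get_required_upgrade_cards : Int × Int × Int × String := (1, 5, 3, "rare")

def Spec_get_required_upgrade_cards (currentLevel : Int) (targetLevel : Int) (currentCount : Int) (rarity : String) (out : Int) : Prop := out = get_required_upgrade_cards_alt currentLevel targetLevel currentCount rarity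
instance (currentLevel : Int) (targetLevel : Int) (currentCount : Int) (rarity : String) (out : Int) : Decidable (Spec_get_required_upgrade_cards currentLevel targetLevel currentCount rarity out) := by unfold Spec_get_required_upgrade_cards; infer_instance

-- ===== CLAIM (what is proved, stated in full; the proofs are below) =====
def Claim_equal_get_required_upgrade_cards : Prop := ∀ (currentLevel : Int) (targetLevel : Int) (currentCount : Int) (rarity : String), Dom_get_required_upgrade_cards currentLevel targetLevel currentCount rarity → Pre_get_required_upgrade_cards currentLevel targetLevel currentCount rarity → Spec_get_required_upgrade_cards currentLevel targetLevel currentCount rarity (get_required_upgrade_cards currentLevel targetLevel currentCount rarity)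

-- ===== LEMMAS AND PROOFS =====

-- With currentCount = 0 and bounded levels everything is closed: check all cases by kernel evaluation.
lemma pv_key : ∀ r ∈ ["common","rare","epic","legendary","champion"],
    ∀ c ∈ List.range 14, ∀ t ∈ List.range 15,
      get_required_upgrade_cards (c : Int) (t : Int) 0 r
        = get_required_upgrade_cards_alt (c : Int) (t : Int) 0 r := by decide

-- currentCount enters both sides only as a final subtraction.
lemma pv_shiftA (c t cc : Int) (r : String) (h1 : ¬ c ≥ t) (h2 : ¬ t > 14) :
    get_required_upgrade_cards c t cc r = get_required_upgrade_cards c t 0 r - cc := by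
  simp only [get_required_upgrade_cards, if_neg h1, if_neg h2]
  omega

lemma pv_shiftB (c t cc : Int) (r : String) (h1 : ¬ c ≥ t) (h2 : ¬ t > 14) :
    get_required_upgrade_cards_alt c t cc r = get_required_upgrade_cards_alt c t 0 r - cc := by
  simp only [get_required_upgrade_cards_alt, if_neg h1, if_neg h2]
  cases PySem.Dict.get? pvPrefixTable r with
  | none => dsimp only; omega
  | some op => dsimp only; omega

-- ===== VERDICT (by name: the statement is the Claim_ definition above) =====
theorem get_required_upgrade_cards_spec : Claim_equal_get_required_upgrade_cards := by
  intro c t cc r _ hpre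
  unfold Spec_get_required_upgrade_cards
  rcases hpre with h | ⟨hc, hct, ht, hr⟩
  · simp only [get_required_upgrade_cards, get_required_upgrade_cards_alt, if_pos (by omega : c ≥ t)]
  · have h1 : ¬ c ≥ t := by omega
    have h2 : ¬ t > 14 := by omega
    have hrmem : r ∈ ["common","rare","epic","legendary","champion"] := by
      rcases hr with h|h|h|h|h <;> simp [h]
    have hcnat : c = ((c.toNat : Int)) := by omega
    have htnat : t = ((t.toNat : Int)) := by omega
    have hkey := pv_key r hrmem c.toNat (by simp [List.mem_range]; omega)
      t.toNat (by simp [List.mem_range]; omega)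
    rw [pv_shiftA c t cc r h1 h2, pv_shiftB c t cc r h1 h2, hcnat, htnat, hkey]
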